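-- pv_equiv track=rewrite | github.com/pabloschwarzenberg/grader | tema4_ej3/tema4_ej3_b4691196c489a4f00f5eb1726ac6e535.py | a_jerigonzo
-- ===== SOURCE A (Python) =====
-- def a_jerigonzo(texto):
--     vocales = "aeiouAEIOU"
--     resultado = ""
--     for letra in texto:
--         if letra in vocales:
--             resultado += letra + "p" + letra.lower()
--         else:
--             resultado += letra
--     return resultado
-- ===== SOURCE B (Python) =====
-- def a_jerigonzo(texto):
--     # Staged rewriting: one whole-string replace pass per vowel.
--     # Lowercase vowels are processed first, so the lowercase vowel inserted by an
--     # uppercase expansion (e.g. 'A' -> 'Apa') is never expanded again; a lowercase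
--     # pass itself is simultaneous, so the vowel it re-inserts is not re-expanded either.
--     for v in "aeiouAEIOU":
--         texto = texto.replace(v, v + "p" + v.lower())
--     return texto
-- ===== Notes on version B (the rewrite author's own statement) =====
-- stated objective: alternative
-- what changed: Replaces A's single per-character Python loop with branching and string accumulation by ten staged whole-string str.replace passes (one per vowel, lowercase vowels first so the lowercase vowel inserted by an uppercase expansion is never re-expanded).
import Mathlib
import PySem

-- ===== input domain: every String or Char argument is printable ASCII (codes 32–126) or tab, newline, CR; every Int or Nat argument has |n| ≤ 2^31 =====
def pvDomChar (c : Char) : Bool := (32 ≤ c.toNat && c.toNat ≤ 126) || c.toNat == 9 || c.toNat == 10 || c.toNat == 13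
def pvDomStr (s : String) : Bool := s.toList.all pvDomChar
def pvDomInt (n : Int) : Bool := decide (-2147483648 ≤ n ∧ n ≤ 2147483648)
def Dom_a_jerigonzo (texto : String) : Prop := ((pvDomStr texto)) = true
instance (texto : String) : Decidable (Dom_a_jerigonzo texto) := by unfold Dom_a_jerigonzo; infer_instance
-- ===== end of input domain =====

-- B replaces A's single per-character scan by ten staged whole-string replace passes
-- (one str.replace per vowel, lowercase first); proved to return the same string on every input.


-- ===== PORT A =====
-- for letra in texto: if letra in vocales: resultado += letra+"p"+letra.lower() else resultado += letra
def a_jerigonzo (texto : String) : String :=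
  String.ofList (texto.toList.foldl
    (fun resultado letra =>
      if letra ∈ "aeiouAEIOU".toList then
        resultado ++ [letra, 'p', PySem.Chars.lowerChar letra]
      else
        resultado ++ [letra]) [])

-- ===== PORT B =====
-- for v in "aeiouAEIOU": texto = texto.replace(v, v + "p" + v.lower())
def a_jerigonzo_alt (texto : String) : String :=
  "aeiouAEIOU".toList.foldl
    (fun t v => PySem.Str.replace t (String.ofList [v]) (String.ofList [v, 'p', PySem.Chars.lowerChar v]))
    texto

-- ===== PRECONDITION & SPEC =====
def Spec_a_jerigonzo (texto : String) (out : String) : Prop := out = a_jerigonzo_alt texto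
instance (texto : String) (out : String) : Decidable (Spec_a_jerigonzo texto out) := by unfold Spec_a_jerigonzo; infer_instance

-- ===== CLAIM (what is proved, stated in full; the proofs are below) =====
def Claim_equal_a_jerigonzo : Prop := ∀ (texto : String), Dom_a_jerigonzo texto → Spec_a_jerigonzo texto (a_jerigonzo texto)

-- ===== LEMMAS AND PROOFS =====

-- single-character replace is a flatMap over the characters
theorem replace_go_single (v : Char) (new : List Char) :
    ∀ (fuel : Nat) (l acc : List Char), l.length ≤ fuel →
      PySem.Chars.replace.go [v] new fuel l acc
        = acc.reverse ++ l.flatMap (fun c => if c = v then new else [c]) := by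
  intro fuel
  induction fuel with
  | zero =>
    intro l acc h
    have : l = [] := List.eq_nil_of_length_eq_zero (Nat.le_zero.mp h)
    subst this
    simp [PySem.Chars.replace.go]
  | succ n ih =>
    intro l acc h
    cases l with
    | nil => simp [PySem.Chars.replace.go]
    | cons c t =>
      have ht : t.length ≤ n := by simpa using h
      by_cases hc : c = v
      · subst hc
        have hp : List.isPrefixOf [c] (c :: t) = true := by
          simp [List.isPrefixOf]
        simp only [PySem.Chars.replace.go, hp, if_true]
        rw [ih _ _ (by simpa using ht)]
        simp
      · have hp : List.isPrefixOf [v] (c :: t) = false := by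
          simp [List.isPrefixOf]
          exact fun e => (hc e.symm).elim
        simp only [PySem.Chars.replace.go, hp]
        rw [if_neg (by simp), ih _ _ ht]
        simp [hc]

theorem replace_single (v : Char) (new l : List Char) :
    PySem.Chars.replace l [v] new = l.flatMap (fun c => if c = v then new else [c]) := by
  rw [PySem.Chars.replace]
  rw [if_neg (by simp)]
  exact replace_go_single v new l.length l [] le_rfl

-- the ten staged passes, on character lists
def stages (l : List Char) : List Char :=
  "aeiouAEIOU".toList.foldl
    (fun t v => PySem.Chars.replace t [v] [v, 'p', PySem.Chars.lowerChar v]) l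

-- each pass distributes over ++, hence so does the whole pipeline
theorem stages_append (l₁ l₂ : List Char) :
    stages (l₁ ++ l₂) = stages l₁ ++ stages l₂ := by
  unfold stages
  generalize "aeiouAEIOU".toList = vs
  induction vs generalizing l₁ l₂ with
  | nil => simp
  | cons v vs ih =>
    rw [List.foldl_cons, List.foldl_cons, List.foldl_cons,
      replace_single v _ (l₁ ++ l₂), replace_single v _ l₁, replace_single v _ l₂,
      List.flatMap_append]
    exact ih _ _

-- the pipeline on a single character equals A's per-character expansion
theorem stages_char (c : Char) :
    stages [c] = (if c ∈ "aeiouAEIOU".toList then [c, 'p', PySem.Chars.lowerChar c] else [c]) := by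
  by_cases h : c ∈ "aeiouAEIOU".toList
  · rw [if_pos h]
    have hl : "aeiouAEIOU".toList = ['a','e','i','o','u','A','E','I','O','U'] := rfl
    rw [hl] at h
    fin_cases h <;> decide
  · rw [if_neg h]
    unfold stages
    have hv : ∀ v ∈ "aeiouAEIOU".toList, c ≠ v := fun v hv e => h (e ▸ hv)
    generalize hvs : "aeiouAEIOU".toList = vs
    rw [hvs] at hv
    clear hvs h
    induction vs with
    | nil => rfl
    | cons v vs ih =>
      rw [List.foldl_cons, replace_single v _ [c]]
      simp only [List.flatMap_cons, List.flatMap_nil, List.append_nil]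
      rw [if_neg (hv v (List.mem_cons_self))]
      exact ih (fun w hw => hv w (List.mem_cons_of_mem _ hw))

theorem stages_eq_flatMap (l : List Char) :
    stages l = l.flatMap (fun c =>
      if c ∈ "aeiouAEIOU".toList then [c, 'p', PySem.Chars.lowerChar c] else [c]) := by
  induction l with
  | nil => rfl
  | cons c t ih =>
    have : (c :: t) = [c] ++ t := rfl
    rw [this, stages_append, ih, stages_char]
    simp

-- B's String-level fold projects to the character-level pipeline
theorem foldB_toList (vs : List Char) (s : String) :
    (vs.foldl
      (fun t v => PySem.Str.replace t (String.ofList [v]) (String.ofList [v, 'p', PySem.Chars.lowerChar v]))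
      s).toList
    = vs.foldl (fun t v => PySem.Chars.replace t [v] [v, 'p', PySem.Chars.lowerChar v]) s.toList := by
  induction vs generalizing s with
  | nil => rfl
  | cons v vs ih =>
    rw [List.foldl_cons, List.foldl_cons, ih, PySem.Str.toList_replace]
    simp

-- ===== VERDICT (by name: the statement is the Claim_ definition above) =====
theorem a_jerigonzo_spec : Claim_equal_a_jerigonzo := by
  intro texto _
  show _ = _
  unfold a_jerigonzo a_jerigonzo_alt
  apply String.toList_injective
  rw [foldB_toList]
  have hB : "aeiouAEIOU".toList.foldl
      (fun t v => PySem.Chars.replace t [v] [v, 'p', PySem.Chars.lowerChar v]) texto.toList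
      = stages texto.toList := rfl
  rw [hB, stages_eq_flatMap]
  have hA : (String.ofList (texto.toList.foldl
      (fun resultado letra =>
        if letra ∈ "aeiouAEIOU".toList then
          resultado ++ [letra, 'p', PySem.Chars.lowerChar letra]
        else resultado ++ [letra]) [])).toList
      = texto.toList.foldl
        (fun resultado letra =>
          if letra ∈ "aeiouAEIOU".toList then
            resultado ++ [letra, 'p', PySem.Chars.lowerChar letra]
          else resultado ++ [letra]) [] := by simp
  rw [hA]
  rw [show (fun (resultado : List Char) letra =>
        if letra ∈ "aeiouAEIOU".toList then
          resultado ++ [letra, 'p', PySem.Chars.lowerChar letra]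
        else resultado ++ [letra])
      = (fun resultado letra => resultado ++
          (if letra ∈ "aeiouAEIOU".toList then [letra, 'p', PySem.Chars.lowerChar letra]
           else [letra])) from by funext a b; split <;> rfl]
  rw [PySem.List.foldl_append_eq_flatMap]
  simp
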